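-- pv_equiv track=rewrite | github.com/wyagami/receitas | receitas.py | extract_ingredient_list
-- ===== SOURCE A (Python) =====
-- def extract_ingredient_list(receita):
--     """
--     Extrai a lista de ingredientes da receita. Essa função precisará ser adaptada
--     para o formato específico das receitas geradas pela sua IA.
--     """
--     # Implemente a lógica para analisar a string da receita e extrair a lista de ingredientes.
--     # Isso pode envolver o uso de expressões regulares ou outras técnicas de processamento de texto.
--     # Exemplo simplificado (adapte à sua necessidade):
--     lines = receita.split('\n')
--     ingredients = []
--     ingredient_section_started = False
--     for line in lines:
--         line = line.strip()
--         if line.lower().startswith("ingredientes"):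
--             ingredient_section_started = True
--             continue
--         if ingredient_section_started and line:
--             ingredients.append(line) # Adiciona cada linha como um ingrediente (melhorar)
--     return ingredients
-- ===== SOURCE B (Python) =====
-- def extract_ingredient_list(receita):
--     stripped = [l.strip() for l in receita.split('\n')]
--     idx = next((i for i, l in enumerate(stripped)
--                 if l.lower().startswith("ingredientes")), None)
--     if idx is None:
--         return []
--     return [l for l in stripped[idx+1:]
--             if l and not l.lower().startswith("ingredientes")]
-- ===== Notes on version B (the rewrite author's own statement) =====
-- stated objective: idiomatic
-- what changed: Replaced the single stateful scan with a boolean flag by a two-phase decomposition: locate the marker line's index first, then filter the stripped lines after it.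
import Mathlib
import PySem

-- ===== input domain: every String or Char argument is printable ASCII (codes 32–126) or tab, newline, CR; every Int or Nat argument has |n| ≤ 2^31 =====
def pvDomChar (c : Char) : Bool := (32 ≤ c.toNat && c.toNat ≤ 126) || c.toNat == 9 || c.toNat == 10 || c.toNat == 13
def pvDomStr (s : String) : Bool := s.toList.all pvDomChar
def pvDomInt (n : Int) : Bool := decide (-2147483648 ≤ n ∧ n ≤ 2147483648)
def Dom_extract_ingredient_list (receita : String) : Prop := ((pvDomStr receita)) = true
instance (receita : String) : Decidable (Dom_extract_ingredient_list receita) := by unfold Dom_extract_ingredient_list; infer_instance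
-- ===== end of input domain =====

-- B replaces A's single stateful scan (boolean flag) by a two-phase decomposition:
-- find the marker line's index, then filter the stripped lines after it (same values; idiomatic).


-- shared by both ports: the Python expression  line.lower().startswith("ingredientes")
def pvMarker (l : String) : Bool := PySem.Str.startswith (PySem.Str.lower l) "ingredientes"

-- ===== PORT A =====
-- the body of A's for-loop; the line is already stripped by the caller
def pvStepA (st : Bool × List String) (line : String) : Bool × List String :=
  if pvMarker line then (true, st.2)
  else if st.1 && !(line == "") then (st.1, st.2 ++ [line])
  else st

def extract_ingredient_list (receita : String) : List String :=
  let lines := (PySem.Str.split? receita "\n").getD []   -- sep "\n" ≠ "", so split? is exact here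
  (lines.foldl (fun st line => pvStepA st (PySem.Str.strip line)) (false, [])).2

-- ===== PORT B =====
def extract_ingredient_list_alt (receita : String) : List String :=
  let stripped := ((PySem.Str.split? receita "\n").getD []).map PySem.Str.strip
  match stripped.findIdx? pvMarker with
  | none => []
  | some i => (stripped.drop (i + 1)).filter (fun l => !(l == "") && !(pvMarker l))

-- ===== PRECONDITION & SPEC =====
def Spec_extract_ingredient_list (receita : String) (out : List String) : Prop := out = extract_ingredient_list_alt receita
instance (receita : String) (out : List String) : Decidable (Spec_extract_ingredient_list receita out) := by unfold Spec_extract_ingredient_list; infer_instance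

-- ===== CLAIM (what is proved, stated in full; the proofs are below) =====
def Claim_equal_extract_ingredient_list : Prop := ∀ (receita : String), Dom_extract_ingredient_list receita → Spec_extract_ingredient_list receita (extract_ingredient_list receita)

-- ===== LEMMAS AND PROOFS =====

-- once the flag is true, A's loop appends exactly the nonempty non-marker lines
theorem pv_foldA_started (ls : List String) (acc : List String) :
    (ls.foldl pvStepA (true, acc)).2 = acc ++ ls.filter (fun l => !(l == "") && !(pvMarker l)) := by
  induction ls generalizing acc with
  | nil => simp
  | cons l ls ih =>
    by_cases h : pvMarker l = true <;>
      by_cases he : (l == "") = true <;>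
        simp [pvStepA, h, he, ih]

-- before the marker A's loop keeps state (false, []); B's find-then-filter matches the whole run
theorem pv_foldA_unstarted (ls : List String) :
    (ls.foldl pvStepA (false, [])).2 =
      match ls.findIdx? pvMarker with
      | none => []
      | some i => (ls.drop (i + 1)).filter (fun l => !(l == "") && !(pvMarker l)) := by
  induction ls with
  | nil => simp
  | cons l ls ih =>
    by_cases h : pvMarker l = true
    · simp [List.findIdx?_cons, pvStepA, h, pv_foldA_started]
    · have hstep : pvStepA (false, []) l = (false, []) := by simp [pvStepA, h]
      simp only [List.foldl_cons, List.findIdx?_cons, h, Bool.false_eq_true, if_false, hstep, ih]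
      cases hf : ls.findIdx? pvMarker with
      | none => simp
      | some i => simp

-- A's whole run over raw lines equals B's find-then-filter over the stripped lines
theorem pv_main (ls : List String) :
    (ls.foldl (fun st l => pvStepA st (PySem.Str.strip l)) (false, [])).2 =
      match (ls.map PySem.Str.strip).findIdx? pvMarker with
      | none => []
      | some i => ((ls.map PySem.Str.strip).drop (i + 1)).filter (fun l => !(l == "") && !(pvMarker l)) := by
  rw [← List.foldl_map (f := PySem.Str.strip) (g := pvStepA)]
  exact pv_foldA_unstarted _

-- ===== VERDICT (by name: the statement is the Claim_ definition above) =====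
theorem extract_ingredient_list_spec : Claim_equal_extract_ingredient_list := by
  intro receita _
  exact pv_main ((PySem.Str.split? receita "\n").getD [])
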